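-- pv_equiv track=rewrite | github.com/Whaletail930/2DLipsync | code/miscallenous/ground_truth_test.py | remove_single_frame_visemes
-- ===== SOURCE A (Python) =====
-- def remove_single_frame_visemes(frames):
--     """
--     Remove single-frame visemes by enforcing a minimum duration of two frames per viseme.
--     Each frame consists of multiple visemes, and the structure is preserved.
--
--     Parameters:
--         frames (list): List of frames, where each frame is a list of viseme predictions.
--
--     Returns:
--         list: List of frames with single-frame viseme transitions replaced.
--     """
--     final_frames = []
--     previous_frame = None
--     viseme_duration = 0
--
--     for current_frame in frames:
--         dominant_viseme = current_frame[0] if current_frame else 'X'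
--
--         if previous_frame is None or dominant_viseme != previous_frame[0]:
--             if viseme_duration < 2 and previous_frame is not None:
--                 for _ in range(viseme_duration):
--                     final_frames.append(previous_frame)
--             else:
--                 for _ in range(max(1, viseme_duration)):
--                     final_frames.append(previous_frame)
--
--             previous_frame = current_frame or ['X'] * len(current_frame)
--             viseme_duration = 1
--         else:
--             viseme_duration += 1
--
--     if previous_frame is not None:
--         for _ in range(max(1, viseme_duration)):
--             final_frames.append(previous_frame)
--
--     if not final_frames or final_frames[0] is None:
--         final_frames = [['X']] * 8 + final_frames[1:]
--
--     return final_frames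
-- ===== SOURCE B (Python) =====
-- def remove_single_frame_visemes(frames):
--     """Run-scanning re-implementation: always emit the 8-frame 'X' lead-in,
--     then split frames into consecutive runs sharing the same dominant viseme
--     (frame[0], or 'X' for an empty frame) and emit the run's first frame once
--     per member frame."""
--     result = [['X']] * 8
--     i, n = 0, len(frames)
--     while i < n:
--         key = frames[i][0] if frames[i] else 'X'
--         j = i + 1
--         while j < n and (frames[j][0] if frames[j] else 'X') == key:
--             j += 1
--         result.extend([frames[i]] * (j - i))
--         i = j
--     return result
-- ===== Notes on version B (the rewrite author's own statement) =====
-- stated objective: simpler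
-- what changed: Replaced the streaming previous_frame/viseme_duration state machine with its trailing flush and None-sentinel replacement by a two-pointer run scanner that emits each run's first frame once per member after an unconditional 8-frame 'X' lead-in.
import Mathlib
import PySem

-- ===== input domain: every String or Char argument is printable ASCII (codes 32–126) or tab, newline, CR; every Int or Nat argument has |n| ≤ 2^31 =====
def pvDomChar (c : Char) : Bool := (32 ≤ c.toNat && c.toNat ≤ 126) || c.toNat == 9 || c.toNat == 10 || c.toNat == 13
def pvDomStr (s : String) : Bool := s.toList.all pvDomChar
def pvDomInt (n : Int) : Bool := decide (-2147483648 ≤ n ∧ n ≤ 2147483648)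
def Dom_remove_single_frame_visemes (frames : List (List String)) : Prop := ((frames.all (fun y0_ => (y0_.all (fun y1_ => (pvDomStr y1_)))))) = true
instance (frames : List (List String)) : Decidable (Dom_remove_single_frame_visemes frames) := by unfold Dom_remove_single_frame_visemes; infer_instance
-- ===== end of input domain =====

-- B replaces A's streaming previous_frame/duration state machine (with its trailing flush
-- and None-sentinel head replacement) by a two-pointer run scanner over dominant visemes;
-- equal return values on Pre_ (the inputs where A does not raise IndexError).

-- ===== PORT A =====
-- final_frames is a list of Option because Python's list transiently holds None
-- (previous_frame is appended while still None); under Pre_ the only none is at the head.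
-- dominant viseme of a frame: `frame[0] if frame else 'X'` (used by both ports)
def keyB (f : List String) : String := match f with | [] => "X" | v :: _ => v

def pyLoopA : List (List String) → List (Option (List String)) → Option (List String) → Nat →
    List (Option (List String)) × Option (List String) × Nat
  | [], final, prev, dur => (final, prev, dur)
  | current :: rest, final, prev, dur =>
    let dominant : String := keyB current
    let isNew : Bool := match prev with
      | none => true
      | some p => some dominant != PySem.List.pyGet? p 0
        -- Python raises IndexError here when p = []; such inputs are outside Pre_
    if isNew then
      let final' :=
        if dur < 2 && prev.isSome then final ++ List.replicate dur prev
        else final ++ List.replicate (max 1 dur) prev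
      pyLoopA rest final' (some (if current = [] then List.replicate current.length "X" else current)) 1
    else
      pyLoopA rest final prev (dur + 1)

def remove_single_frame_visemes (frames : List (List String)) : List (List String) :=
  let res := pyLoopA frames [] none 0
  let final : List (Option (List String)) :=
    match res.2.1 with
    | none => res.1
    | some _ => res.1 ++ List.replicate (max 1 res.2.2) res.2.1
  if final = [] ∨ final.head? = some none then
    List.replicate 8 ["X"] ++ (final.drop 1).map (fun o => o.getD [])
  else
    final.map (fun o => o.getD [])

-- ===== PORT B =====
-- Source B's outer while loop over index i; the inner while loop finding the run's end j is the
-- takeWhile length. Fuel (= number of frames left) only makes the index-jumping loop structural.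
def bScanF : Nat → List (List String) → List (List String)
  | 0, _ => []
  | _ + 1, [] => []
  | fuel + 1, f :: rest =>
    let r := (rest.takeWhile (fun g => keyB g == keyB f)).length
    List.replicate (r + 1) f ++ bScanF fuel (rest.drop r)

def remove_single_frame_visemes_alt (frames : List (List String)) : List (List String) :=
  List.replicate 8 ["X"] ++ bScanF frames.length frames

-- ===== PRECONDITION & SPEC =====
-- Pre_ excludes exactly the inputs on which A raises IndexError: an empty frame
-- that is followed by another frame (previous_frame[0] on the empty list).
def Pre_remove_single_frame_visemes (frames : List (List String)) : Prop :=
  ∀ f ∈ frames.dropLast, f ≠ []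
instance (frames : List (List String)) : Decidable (Pre_remove_single_frame_visemes frames) := by
  unfold Pre_remove_single_frame_visemes; infer_instance

def pvWitness_remove_single_frame_visemes : List (List String) := [["A"], ["A"], ["B"]]

def Spec_remove_single_frame_visemes (frames : List (List String)) (out : List (List String)) : Prop := out = remove_single_frame_visemes_alt frames
instance (frames : List (List String)) (out : List (List String)) : Decidable (Spec_remove_single_frame_visemes frames out) := by unfold Spec_remove_single_frame_visemes; infer_instance

-- ===== CLAIM (what is proved, stated in full; the proofs are below) =====
def Claim_equal_remove_single_frame_visemes : Prop := ∀ (frames : List (List String)), Dom_remove_single_frame_visemes frames → Pre_remove_single_frame_visemes frames → Spec_remove_single_frame_visemes frames (remove_single_frame_visemes frames)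
-- ===== LEMMAS AND PROOFS =====

-- fuel-free view of B's scanner
def bScan (l : List (List String)) : List (List String) := bScanF l.length l

theorem bScanF_eq (fuel : Nat) : ∀ l : List (List String), l.length ≤ fuel → bScanF fuel l = bScan l := by
  induction fuel using Nat.strong_induction_on with
  | _ fuel ih =>
    intro l hl
    match fuel, l with
    | 0, [] => rfl
    | fuel + 1, [] => rfl
    | fuel + 1, f :: rest =>
      have hl' : rest.length + 1 ≤ fuel + 1 := by simpa using hl
      have hr : (rest.takeWhile (fun g => keyB g == keyB f)).length ≤ rest.length :=
        (List.takeWhile_prefix _).length_le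
      have h1 : (rest.drop (rest.takeWhile (fun g => keyB g == keyB f)).length).length ≤ fuel := by
        simp only [List.length_drop]; omega
      have h2 : (rest.drop (rest.takeWhile (fun g => keyB g == keyB f)).length).length ≤ rest.length := by
        simp only [List.length_drop]; omega
      simp only [bScan, List.length_cons, bScanF]
      rw [ih fuel (Nat.lt_succ_self _) _ h1, ih rest.length (by omega) _ h2]

theorem bScan_nil : bScan [] = [] := rfl

theorem bScan_cons (f : List String) (rest : List (List String)) :
    bScan (f :: rest) =
      List.replicate ((rest.takeWhile (fun g => keyB g == keyB f)).length + 1) f ++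
        bScan (rest.drop (rest.takeWhile (fun g => keyB g == keyB f)).length) := by
  have hr : (rest.takeWhile (fun g => keyB g == keyB f)).length ≤ rest.length :=
    (List.takeWhile_prefix _).length_le
  have h : (rest.drop (rest.takeWhile (fun g => keyB g == keyB f)).length).length ≤ rest.length := by
    simp only [List.length_drop]; omega
  show bScanF (rest.length + 1) (f :: rest) = _
  rw [bScanF, bScanF_eq rest.length _ h]

-- B's run scanner with a pending run already seen dur times
def bPend (p : List String) (dur : Nat) : List (List String) → List (List String)
  | [] => List.replicate dur p
  | f :: rest =>
    if keyB f = keyB p then bPend p (dur + 1) rest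
    else List.replicate dur p ++ bScan (f :: rest)

theorem bPend_eq_bScan (frames : List (List String)) : ∀ (p : List String) (dur : Nat),
    bPend p (dur + 1) frames = List.replicate dur p ++ bScan (p :: frames) := by
  induction frames with
  | nil =>
    intro p dur
    rw [bPend, bScan_cons]
    simp [bScan_nil, List.replicate_succ']
  | cons f rest ih =>
    intro p dur
    by_cases h : keyB f = keyB p
    · have h' : (keyB f == keyB p) = true := by simp [h]
      rw [bPend, if_pos h, ih p (dur + 1), bScan_cons p rest, bScan_cons p (f :: rest)]
      simp only [List.takeWhile_cons, h', if_true, List.length_cons, List.drop_succ_cons]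
      generalize (List.takeWhile (fun g => keyB g == keyB p) rest).length = n
      rw [← List.append_assoc, ← List.append_assoc, ← List.replicate_add, ← List.replicate_add]
      have harith : dur + 1 + (n + 1) = dur + (n + 1 + 1) := by omega
      rw [harith]
    · have h' : (keyB f == keyB p) = false := by simp [h]
      rw [bPend, if_neg h, bScan_cons p (f :: rest)]
      simp only [List.takeWhile_cons, h', Bool.false_eq_true, if_false, List.length_nil,
        List.drop_zero]
      simp [List.replicate_succ', List.append_assoc]

-- A's post-loop flush
def flushA (st : List (Option (List String)) × Option (List String) × Nat) :
    List (Option (List String)) :=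
  match st with
  | (f, none, _) => f
  | (f, some p, d) => f ++ List.replicate (max 1 d) (some p)

theorem pre_cons {c : List String} {rest : List (List String)}
    (h : Pre_remove_single_frame_visemes (c :: rest)) :
    Pre_remove_single_frame_visemes rest ∧ (rest ≠ [] → c ≠ []) := by
  unfold Pre_remove_single_frame_visemes at *
  match rest with
  | [] => exact ⟨by simp, by simp⟩
  | d :: rest' =>
    rw [List.dropLast_cons₂] at h
    constructor
    · intro f hf; exact h f (List.mem_cons_of_mem _ hf)
    · intro _; exact h c List.mem_cons_self

theorem loopA_eq_bPend (frames : List (List String)) :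
    Pre_remove_single_frame_visemes frames →
    ∀ (final : List (Option (List String))) (p : List String) (dur : Nat), p ≠ [] → 1 ≤ dur →
    flushA (pyLoopA frames final (some p) dur) = final ++ (bPend p dur frames).map some := by
  induction frames with
  | nil =>
    intro _ final p dur _ hdur
    simp only [pyLoopA, flushA, bPend, Nat.max_eq_right hdur, List.map_replicate]
  | cons current rest ih =>
    intro hpre final p dur hp hdur
    obtain ⟨hpre', hc⟩ := pre_cons hpre
    obtain ⟨v, p', rfl⟩ : ∃ v p', p = v :: p' := by
      match p with
      | [] => exact absurd rfl hp
      | v :: p' => exact ⟨v, p', rfl⟩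
    simp only [pyLoopA]
    have hget : PySem.List.pyGet? (v :: p') 0 = some v := by
      simp [PySem.List.pyGet?, PySem.List.pyIdx?]
    simp only [hget]
    by_cases heq : keyB current = v
    · have hbne : (some (keyB current) != some v) = false := by simp [heq]
      rw [hbne, if_neg (by simp)]
      rw [ih hpre' final (v :: p') (dur + 1) hp (by omega)]
      rw [bPend, if_pos (show keyB current = keyB (v :: p') from heq)]
    · have hbne : (some (keyB current) != some v) = true := by simp [heq]
      rw [hbne, if_pos rfl]
      have hfinal' :
          (if (decide (dur < 2) && (some (v :: p')).isSome) = true then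
              final ++ List.replicate dur (some (v :: p'))
           else final ++ List.replicate (max 1 dur) (some (v :: p'))) =
          final ++ List.replicate dur (some (v :: p')) := by
        by_cases h2 : dur < 2
        · simp [h2]
        · rw [if_neg (by simp [h2]), Nat.max_eq_right hdur]
      rw [hfinal']
      have hrep : (if current = [] then List.replicate current.length "X" else current) = current := by
        by_cases hcur : current = [] <;> simp [hcur]
      rw [hrep]
      by_cases hcur : current = []
      · have hrest : rest = [] := by
          by_contra hne2; exact (hc hne2) hcur
        subst hrest; subst hcur
        rw [pyLoopA, bPend, if_neg (show ¬ keyB [] = keyB (v :: p') from heq)]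
        simp [flushA, bScan_cons, bScan_nil, List.append_assoc]
      · rw [ih hpre' _ current 1 hcur (le_refl 1),
          bPend, if_neg (show ¬ keyB current = keyB (v :: p') from heq)]
        have hb : bPend current 1 rest = bScan (current :: rest) := by
          simpa using bPend_eq_bScan rest current 0
        rw [hb]
        simp [List.append_assoc]

theorem flush_eq (res : List (Option (List String)) × Option (List String) × Nat) :
    (match res.2.1 with
     | none => res.1
     | some _ => res.1 ++ List.replicate (max 1 res.2.2) res.2.1) = flushA res := by
  obtain ⟨f, pr, d⟩ := res
  cases pr <;> rfl

-- ===== VERDICT (by name: the statement is the Claim_ definition above) =====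
theorem remove_single_frame_visemes_spec : Claim_equal_remove_single_frame_visemes := by
  intro frames _ hpre
  unfold Spec_remove_single_frame_visemes
  match frames with
  | [] => rfl
  | current :: rest =>
    obtain ⟨hpre', hc⟩ := pre_cons hpre
    by_cases hcur : current = []
    · have hrest : rest = [] := by
        by_contra hne; exact (hc hne) hcur
      subst hrest; subst hcur
      decide
    · unfold remove_single_frame_visemes
      simp only [pyLoopA]
      norm_num
      have hrep : (if current = [] then List.replicate current.length "X" else current) = current := by
        simp [hcur]
      rw [hrep, flush_eq, loopA_eq_bPend rest hpre' [none] current 1 hcur (le_refl 1)]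
      have hb : bPend current 1 rest = bScan (current :: rest) := by
        simpa using bPend_eq_bScan rest current 0
      rw [hb]
      simp only [List.cons_append, List.nil_append, List.head?_cons, List.drop_succ_cons,
        List.drop_zero, reduceIte, List.map_map]
      unfold remove_single_frame_visemes_alt
      rw [← bScanF_eq (current :: rest).length _ (le_refl _)]
      simp [Function.comp, bScan]
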